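-- pv_equiv track=rewrite | github.com/aws-samples/sample-bedrock-migration-and-modernization-tools | bedrock-model-profiler/ui/model_details_modal.py | group_pricing_by_geography_comprehensive
-- ===== SOURCE A (Python) =====
-- from typing import Dict, Any, List
--
-- def map_region_to_geography(region: str) -> str:
--     """Map AWS region to geographical area"""
--     if region.startswith('us-') or region.startswith('ca-'):
--         return 'North America'
--     elif region.startswith('eu-'):
--         return 'Europe'
--     elif region.startswith('ap-'):
--         return 'Asia Pacific'
--     elif region.startswith('sa-'):
--         return 'South America'
--     else:
--         return 'Other Regions'
--
-- def group_pricing_by_geography_comprehensive(category_data: Dict[str, List[Dict[str, Any]]]) -> Dict[str, Dict[str, List[Dict[str, Any]]]]: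
--     """Group comprehensive pricing data by geographical regions"""
--     geo_groups = {
--         'North America': {},
--         'Europe': {},
--         'Asia Pacific': {},
--         'South America': {},
--         'Other Regions': {}
--     }
--
--     for region, pricing_items in category_data.items():
--         geo_region = map_region_to_geography(region)
--         geo_groups[geo_region][region] = pricing_items
--
--     # Remove empty groups
--     return {k: v for k, v in geo_groups.items() if v}
-- ===== SOURCE B (Python) =====
-- def group_pricing_by_geography_comprehensive(category_data):
--     """Group comprehensive pricing data by geographical regions.
--
--     Output-driven pass: for each geography (in fixed order) scan category_data
--     once, keeping the regions whose prefix belongs to that geography.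
--     """
--     geos = [('North America', ('us-', 'ca-')),
--             ('Europe', ('eu-',)),
--             ('Asia Pacific', ('ap-',)),
--             ('South America', ('sa-',)),
--             ('Other Regions', ())]
--     known = ('us-', 'ca-', 'eu-', 'ap-', 'sa-')
--     result = {}
--     for geo, prefixes in geos:
--         if prefixes:
--             sub = {r: items for r, items in category_data.items() if r.startswith(prefixes)}
--         else:
--             sub = {r: items for r, items in category_data.items() if not r.startswith(known)}
--         if sub:
--             result[geo] = sub
--     return result
-- ===== Notes on version B (the rewrite author's own statement) =====
-- stated objective: alternative
-- what changed: Replaced the single input pass into five pre-built mutable buckets (plus a helper classifying each region and a final empty-group filter) by an output-driven pass: for each geography in fixed order, one dict comprehension over category_data keeps the regions matching that geography's prefix tuple (or none of the known prefixes for 'Other Regions'), and the geography is added only if non-empty.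
import Mathlib
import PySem

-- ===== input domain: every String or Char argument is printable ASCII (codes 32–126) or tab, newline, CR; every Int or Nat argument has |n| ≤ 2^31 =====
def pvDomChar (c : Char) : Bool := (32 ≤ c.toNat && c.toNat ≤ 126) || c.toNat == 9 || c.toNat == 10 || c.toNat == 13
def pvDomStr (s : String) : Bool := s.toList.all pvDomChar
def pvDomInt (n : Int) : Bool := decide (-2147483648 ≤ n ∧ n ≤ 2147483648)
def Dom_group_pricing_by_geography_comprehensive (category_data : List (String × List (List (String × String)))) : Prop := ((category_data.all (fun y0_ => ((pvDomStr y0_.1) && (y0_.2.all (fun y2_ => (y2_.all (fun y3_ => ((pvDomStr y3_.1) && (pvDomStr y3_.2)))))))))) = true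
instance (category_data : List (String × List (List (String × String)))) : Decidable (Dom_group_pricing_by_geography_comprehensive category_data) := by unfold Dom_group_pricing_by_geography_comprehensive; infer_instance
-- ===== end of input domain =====

-- B groups by an output-driven pass (for each geography in fixed order, one rescan of
-- category_data against its prefix table) instead of A's single input pass that classifies
-- each region into five pre-built buckets; same O(n) cost, different decomposition.

-- ===== PORT A =====
-- map_region_to_geography
def map_region_to_geography (region : String) : String :=
  if PySem.Str.startswith region "us-" || PySem.Str.startswith region "ca-" then "North America"
  else if PySem.Str.startswith region "eu-" then "Europe"
  else if PySem.Str.startswith region "ap-" then "Asia Pacific"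
  else if PySem.Str.startswith region "sa-" then "South America"
  else "Other Regions"

def group_pricing_by_geography_comprehensive (category_data : List (String × List (List (String × String)))) : List (String × List (String × List (List (String × String)))) :=
  -- geo_groups = {'North America': {}, 'Europe': {}, 'Asia Pacific': {}, 'South America': {}, 'Other Regions': {}}
  let geo_groups : PySem.Dict String (PySem.Dict String (List (List (String × String)))) :=
    PySem.Dict.ofList [("North America", PySem.Dict.empty), ("Europe", PySem.Dict.empty),
      ("Asia Pacific", PySem.Dict.empty), ("South America", PySem.Dict.empty),
      ("Other Regions", PySem.Dict.empty)]
  -- for region, pricing_items in category_data.items(): geo_groups[geo_region][region] = pricing_items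
  let geo_groups := category_data.foldl (fun gg p =>
      let geo_region := map_region_to_geography p.1
      gg.insert geo_region ((gg.getD geo_region PySem.Dict.empty).insert p.1 p.2)) geo_groups
  -- return {k: v for k, v in geo_groups.items() if v}
  (geo_groups.items.filter (fun kv => !kv.2.items.isEmpty)).map (fun kv => (kv.1, kv.2.items))

-- ===== PORT B =====
-- geos: each geography with its tuple of region prefixes (empty tuple = catch-all bucket)
def pvGeoTable : List (String × List String) :=
  [("North America", ["us-", "ca-"]), ("Europe", ["eu-"]), ("Asia Pacific", ["ap-"]),
   ("South America", ["sa-"]), ("Other Regions", [])]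

def pvKnownPrefixes : List String := ["us-", "ca-", "eu-", "ap-", "sa-"]

-- the dict comprehension {r: items for r, items in category_data.items() if <keep r>}
def pvSubDict (keep : String → Bool) (category_data : List (String × List (List (String × String)))) :
    PySem.Dict String (List (List (String × String))) :=
  category_data.foldl (fun d p => if keep p.1 then d.insert p.1 p.2 else d) PySem.Dict.empty

def group_pricing_by_geography_comprehensive_alt (category_data : List (String × List (List (String × String)))) : List (String × List (String × List (List (String × String)))) :=
  (pvGeoTable.foldl (fun result gp =>
      let sub :=
        if !gp.2.isEmpty then
          pvSubDict (fun r => gp.2.any (fun p => PySem.Str.startswith r p)) category_data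
        else
          pvSubDict (fun r => !(pvKnownPrefixes.any (fun p => PySem.Str.startswith r p))) category_data
      if !sub.items.isEmpty then result.insert gp.1 sub else result)
    (PySem.Dict.empty)).items.map (fun kv => (kv.1, kv.2.items))

-- ===== PRECONDITION & SPEC =====
def Spec_group_pricing_by_geography_comprehensive (category_data : List (String × List (List (String × String)))) (out : List (String × List (String × List (List (String × String))))) : Prop := out = group_pricing_by_geography_comprehensive_alt category_data
instance (category_data : List (String × List (List (String × String)))) (out : List (String × List (String × List (List (String × String))))) : Decidable (Spec_group_pricing_by_geography_comprehensive category_data out) := by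
  unfold Spec_group_pricing_by_geography_comprehensive
  exact (@instDecidableEqList _ (@instDecidableEqProd _ _ _ (@instDecidableEqList _ (by infer_instance)))) out _

-- ===== CLAIM (what is proved, stated in full; the proofs are below) =====
def Claim_equal_group_pricing_by_geography_comprehensive : Prop := ∀ (category_data : List (String × List (List (String × String)))), Dom_group_pricing_by_geography_comprehensive category_data → Spec_group_pricing_by_geography_comprehensive category_data (group_pricing_by_geography_comprehensive category_data)

-- ===== LEMMAS AND PROOFS =====
lemma pvGeoCases (r : String) :
    map_region_to_geography r = "North America" ∨ map_region_to_geography r = "Europe" ∨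
    map_region_to_geography r = "Asia Pacific" ∨ map_region_to_geography r = "South America" ∨
    map_region_to_geography r = "Other Regions" := by
  unfold map_region_to_geography; split_ifs <;> simp

lemma pvStartswith_excl (s p q : List Char) (hlen : p.length = q.length) (hne : p ≠ q)
    (hp : PySem.Chars.startswith s p = true) : PySem.Chars.startswith s q = false := by
  rw [PySem.Chars.startswith_iff, List.prefix_iff_eq_take] at hp
  by_contra hq
  rw [Bool.not_eq_false, PySem.Chars.startswith_iff, List.prefix_iff_eq_take] at hq
  exact hne (by rw [hp, hq, hlen])

lemma pvExclS (r p q : String) (hlen : p.toList.length = q.toList.length)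
    (hne : p.toList ≠ q.toList) (hp : PySem.Str.startswith r p = true) :
    PySem.Str.startswith r q = false := by
  have := pvStartswith_excl r.toList p.toList q.toList hlen hne (by simpa using hp)
  simpa using this

lemma pvKeep_NA : (fun r => List.any ["us-", "ca-"] (fun p => PySem.Str.startswith r p))
    = (fun r => map_region_to_geography r == "North America") := by
  funext r; unfold map_region_to_geography; split_ifs <;> simp_all

lemma pvKeep_EU : (fun r => List.any ["eu-"] (fun p => PySem.Str.startswith r p))
    = (fun r => map_region_to_geography r == "Europe") := by
  funext r
  cases heu : PySem.Str.startswith r "eu-" with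
  | false => unfold map_region_to_geography; split_ifs <;> simp_all
  | true =>
      have hus := pvExclS r "eu-" "us-" (by decide) (by decide) heu
      have hca := pvExclS r "eu-" "ca-" (by decide) (by decide) heu
      unfold map_region_to_geography; simp_all

lemma pvKeep_AP : (fun r => List.any ["ap-"] (fun p => PySem.Str.startswith r p))
    = (fun r => map_region_to_geography r == "Asia Pacific") := by
  funext r
  cases hap : PySem.Str.startswith r "ap-" with
  | false => unfold map_region_to_geography; split_ifs <;> simp_all
  | true =>
      have hus := pvExclS r "ap-" "us-" (by decide) (by decide) hap
      have hca := pvExclS r "ap-" "ca-" (by decide) (by decide) hap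
      have heu := pvExclS r "ap-" "eu-" (by decide) (by decide) hap
      unfold map_region_to_geography; simp_all

lemma pvKeep_SA : (fun r => List.any ["sa-"] (fun p => PySem.Str.startswith r p))
    = (fun r => map_region_to_geography r == "South America") := by
  funext r
  cases hsa : PySem.Str.startswith r "sa-" with
  | false => unfold map_region_to_geography; split_ifs <;> simp_all
  | true =>
      have hus := pvExclS r "sa-" "us-" (by decide) (by decide) hsa
      have hca := pvExclS r "sa-" "ca-" (by decide) (by decide) hsa
      have heu := pvExclS r "sa-" "eu-" (by decide) (by decide) hsa
      have hap := pvExclS r "sa-" "ap-" (by decide) (by decide) hsa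
      unfold map_region_to_geography; simp_all

lemma pvKeep_OT : (fun r => !(List.any ["us-", "ca-", "eu-", "ap-", "sa-"] (fun p => PySem.Str.startswith r p)))
    = (fun r => map_region_to_geography r == "Other Regions") := by
  funext r
  unfold map_region_to_geography
  cases hus : PySem.Str.startswith r "us-" <;> cases hca : PySem.Str.startswith r "ca-" <;>
    cases heu : PySem.Str.startswith r "eu-" <;> cases hap : PySem.Str.startswith r "ap-" <;>
    cases hsa : PySem.Str.startswith r "sa-" <;> simp_all

def pvSubA0 (g : String) (d : PySem.Dict String (List (List (String × String))))
    (l : List (String × List (List (String × String)))) :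
    PySem.Dict String (List (List (String × String))) :=
  l.foldl (fun d p => if map_region_to_geography p.1 == g then d.insert p.1 p.2 else d) d


def pvSubA (g : String) (d : PySem.Dict String (List (List (String × String))))
    (l : List (String × List (List (String × String)))) :
    PySem.Dict String (List (List (String × String))) :=
  l.foldl (fun d p => if map_region_to_geography p.1 == g then d.insert p.1 p.2 else d) d

def pvMk5 (d1 d2 d3 d4 d5 : PySem.Dict String (List (List (String × String)))) :
    PySem.Dict String (PySem.Dict String (List (List (String × String)))) :=
  PySem.Dict.mk [("North America", d1), ("Europe", d2), ("Asia Pacific", d3),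
    ("South America", d4), ("Other Regions", d5)]

lemma pvGet5_1 (d1 d2 d3 d4 d5) : (pvMk5 d1 d2 d3 d4 d5).getD "North America" PySem.Dict.empty = d1 := by
  simp [pvMk5, PySem.Dict.getD, PySem.Dict.get?]
lemma pvIns5_1 (d1 d2 d3 d4 d5 v) : (pvMk5 d1 d2 d3 d4 d5).insert "North America" v = pvMk5 v d2 d3 d4 d5 := by
  simp [pvMk5, PySem.Dict.insert]
lemma pvGet5_2 (d1 d2 d3 d4 d5) : (pvMk5 d1 d2 d3 d4 d5).getD "Europe" PySem.Dict.empty = d2 := by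
  simp [pvMk5, PySem.Dict.getD, PySem.Dict.get?]
lemma pvIns5_2 (d1 d2 d3 d4 d5 v) : (pvMk5 d1 d2 d3 d4 d5).insert "Europe" v = pvMk5 d1 v d3 d4 d5 := by
  simp [pvMk5, PySem.Dict.insert]
lemma pvGet5_3 (d1 d2 d3 d4 d5) : (pvMk5 d1 d2 d3 d4 d5).getD "Asia Pacific" PySem.Dict.empty = d3 := by
  simp [pvMk5, PySem.Dict.getD, PySem.Dict.get?]
lemma pvIns5_3 (d1 d2 d3 d4 d5 v) : (pvMk5 d1 d2 d3 d4 d5).insert "Asia Pacific" v = pvMk5 d1 d2 v d4 d5 := by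
  simp [pvMk5, PySem.Dict.insert]
lemma pvGet5_4 (d1 d2 d3 d4 d5) : (pvMk5 d1 d2 d3 d4 d5).getD "South America" PySem.Dict.empty = d4 := by
  simp [pvMk5, PySem.Dict.getD, PySem.Dict.get?]
lemma pvIns5_4 (d1 d2 d3 d4 d5 v) : (pvMk5 d1 d2 d3 d4 d5).insert "South America" v = pvMk5 d1 d2 d3 v d5 := by
  simp [pvMk5, PySem.Dict.insert]
lemma pvGet5_5 (d1 d2 d3 d4 d5) : (pvMk5 d1 d2 d3 d4 d5).getD "Other Regions" PySem.Dict.empty = d5 := by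
  simp [pvMk5, PySem.Dict.getD, PySem.Dict.get?]
lemma pvIns5_5 (d1 d2 d3 d4 d5 v) : (pvMk5 d1 d2 d3 d4 d5).insert "Other Regions" v = pvMk5 d1 d2 d3 d4 v := by
  simp [pvMk5, PySem.Dict.insert]

lemma pvFoldA (l : List (String × List (List (String × String))))
    (d1 d2 d3 d4 d5 : PySem.Dict String (List (List (String × String)))) :
    l.foldl (fun gg p =>
        let geo_region := map_region_to_geography p.1
        gg.insert geo_region ((gg.getD geo_region PySem.Dict.empty).insert p.1 p.2))
      (pvMk5 d1 d2 d3 d4 d5)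
    = pvMk5 (pvSubA "North America" d1 l) (pvSubA "Europe" d2 l) (pvSubA "Asia Pacific" d3 l)
        (pvSubA "South America" d4 l) (pvSubA "Other Regions" d5 l) := by
  induction l generalizing d1 d2 d3 d4 d5 with
  | nil => simp [pvSubA]
  | cons p l ih =>
    rcases pvGeoCases p.1 with h | h | h | h | h
    · rw [List.foldl_cons]
      simp only [h]
      rw [pvGet5_1, pvIns5_1, ih]
      simp [pvSubA, h]
    · rw [List.foldl_cons]
      simp only [h]
      rw [pvGet5_2, pvIns5_2, ih]
      simp [pvSubA, h]
    · rw [List.foldl_cons]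
      simp only [h]
      rw [pvGet5_3, pvIns5_3, ih]
      simp [pvSubA, h]
    · rw [List.foldl_cons]
      simp only [h]
      rw [pvGet5_4, pvIns5_4, ih]
      simp [pvSubA, h]
    · rw [List.foldl_cons]
      simp only [h]
      rw [pvGet5_5, pvIns5_5, ih]
      simp [pvSubA, h]

theorem pv_agree (cd : List (String × List (List (String × String)))) :
    group_pricing_by_geography_comprehensive cd = group_pricing_by_geography_comprehensive_alt cd := by
  simp only [group_pricing_by_geography_comprehensive, group_pricing_by_geography_comprehensive_alt]
  have hof : (PySem.Dict.ofList [("North America", PySem.Dict.empty), ("Europe", PySem.Dict.empty),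
      ("Asia Pacific", PySem.Dict.empty), ("South America", PySem.Dict.empty),
      ("Other Regions", PySem.Dict.empty)] : PySem.Dict String (PySem.Dict String (List (List (String × String)))))
      = pvMk5 PySem.Dict.empty PySem.Dict.empty PySem.Dict.empty PySem.Dict.empty PySem.Dict.empty := by
    decide
  rw [hof, pvFoldA]
  have e1 : pvSubDict (fun r => List.any ["us-", "ca-"] (fun p => PySem.Str.startswith r p)) cd
      = pvSubA "North America" PySem.Dict.empty cd := by rw [pvKeep_NA]; rfl
  have e2 : pvSubDict (fun r => List.any ["eu-"] (fun p => PySem.Str.startswith r p)) cd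
      = pvSubA "Europe" PySem.Dict.empty cd := by rw [pvKeep_EU]; rfl
  have e3 : pvSubDict (fun r => List.any ["ap-"] (fun p => PySem.Str.startswith r p)) cd
      = pvSubA "Asia Pacific" PySem.Dict.empty cd := by rw [pvKeep_AP]; rfl
  have e4 : pvSubDict (fun r => List.any ["sa-"] (fun p => PySem.Str.startswith r p)) cd
      = pvSubA "South America" PySem.Dict.empty cd := by rw [pvKeep_SA]; rfl
  have e5 : pvSubDict (fun r => !(pvKnownPrefixes.any (fun p => PySem.Str.startswith r p))) cd
      = pvSubA "Other Regions" PySem.Dict.empty cd := by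
    rw [show pvKnownPrefixes = ["us-", "ca-", "eu-", "ap-", "sa-"] from rfl, pvKeep_OT]; rfl
  simp only [pvGeoTable, List.foldl_cons, List.foldl_nil, List.isEmpty_cons, List.isEmpty_nil,
    Bool.not_true, Bool.not_false, if_true, if_false]
  rw [e1, e2, e3, e4, e5]
  cases h1 : (pvSubA "North America" PySem.Dict.empty cd).items.isEmpty <;>
  cases h2 : (pvSubA "Europe" PySem.Dict.empty cd).items.isEmpty <;>
  cases h3 : (pvSubA "Asia Pacific" PySem.Dict.empty cd).items.isEmpty <;>
  cases h4 : (pvSubA "South America" PySem.Dict.empty cd).items.isEmpty <;>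
  cases h5 : (pvSubA "Other Regions" PySem.Dict.empty cd).items.isEmpty <;>
    simp only [h1, h2, h3, h4, h5, Bool.not_true, Bool.not_false] <;>
    simp [pvMk5, PySem.Dict.insert, h1, h2, h3, h4, h5] <;>
    simp [PySem.Dict.empty]

-- ===== VERDICT (by name: the statement is the Claim_ definition above) =====
theorem group_pricing_by_geography_comprehensive_spec : Claim_equal_group_pricing_by_geography_comprehensive := by
  intro cd _
  unfold Spec_group_pricing_by_geography_comprehensive
  exact pv_agree cd
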